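-- pv_equiv track=rewrite | github.com/jenihuang/Coding_problems | Whiteboard/prefix_suffix.py | prefix_score
-- ===== SOURCE A (Python) =====
-- def prefix_score(text, prefixString):
--
--     max_score = {'score': 0, 'index': None}
--
--     for i in range(len(text)):
--         count = 0
--         inner_count = 0
--         for j in range(len(prefixString)):
--             if prefixString[j] == text[i]:
--                 # match_index = 1
--                 inner_count = 1
--                 while j + inner_count < len(prefixString) and i + inner_count < len(text) and prefixString[j + inner_count] == text[i + inner_count]:
--                     inner_count += 1
--             if inner_count > max_score['score']:
--                 max_score['score'] = inner_count
--                 max_score['index'] = i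
--
--     return max_score['index']
-- ===== SOURCE B (Python) =====
-- def prefix_score(text, prefixString):
--     n, m = len(text), len(prefixString)
--     best_len, best_idx = 0, None
--     prev = [0] * (m + 1)
--     for i in range(n - 1, -1, -1):
--         c = text[i]
--         cur = [(prev[j + 1] + 1) if prefixString[j] == c else 0 for j in range(m)] + [0]
--         row_max = max(cur)
--         if row_max > 0 and row_max >= best_len:
--             best_len, best_idx = row_max, i
--         prev = cur
--     return best_idx
-- ===== Notes on version B (the rewrite author's own statement) =====
-- stated objective: faster
-- what changed: Replaced A's per-position rescan (for every i and j, a while loop re-walks the matching run) by a single backward dynamic-programming sweep on common-substring lengths (cur[j] = prev[j+1]+1 on a character match), taking the row maximum and preferring lower indices on ties.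
import Mathlib
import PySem

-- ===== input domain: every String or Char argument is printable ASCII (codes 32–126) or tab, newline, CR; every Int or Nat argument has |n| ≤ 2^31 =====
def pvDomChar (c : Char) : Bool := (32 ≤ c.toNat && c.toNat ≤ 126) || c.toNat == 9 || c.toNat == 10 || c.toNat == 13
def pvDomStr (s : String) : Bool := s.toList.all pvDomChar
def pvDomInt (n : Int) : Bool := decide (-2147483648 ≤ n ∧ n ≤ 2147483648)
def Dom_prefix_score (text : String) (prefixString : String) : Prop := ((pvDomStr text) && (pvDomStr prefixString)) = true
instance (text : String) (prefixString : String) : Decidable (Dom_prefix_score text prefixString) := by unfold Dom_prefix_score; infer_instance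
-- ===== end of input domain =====

-- B replaces A's per-(i,j) while-loop rescans by a suffix dynamic programme on
-- common-substring lengths (one backward sweep over the text); same return value.

-- ===== PORT A =====
-- A's while loop: extends inner_count while characters keep matching (fuel = p.length suffices
-- since the loop runs only while j + inner_count < p.length)
def pzWhile (t p : List Char) (i j : Nat) : Nat → Nat → Nat
  | ic, 0 => ic
  | ic, fuel+1 =>
    if j + ic < p.length ∧ i + ic < t.length ∧ p.getD (j + ic) ' ' = t.getD (i + ic) ' ' then
      pzWhile t p i j (ic + 1) fuel
    else ic

-- A's inner `for j in range(len(prefixString))` loop; rem = p.length - j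
def pzInnerGo (t p : List Char) (i : Nat) : Nat → Nat → Nat → Nat → Option Int → Nat × Option Int
  | _, 0, _, sc, idx => (sc, idx)
  | j, rem+1, ic, sc, idx =>
    let ic' := if p.getD j ' ' = t.getD i ' ' then pzWhile t p i j 1 p.length else ic
    let st := if ic' > sc then (ic', some (i : Int)) else (sc, idx)
    pzInnerGo t p i (j + 1) rem ic' st.1 st.2

def prefix_score (text : String) (prefixString : String) : Option Int :=
  let t := text.toList
  let p := prefixString.toList
  ((List.range t.length).foldl
      (fun (st : Nat × Option Int) i => pzInnerGo t p i 0 p.length 0 st.1 st.2)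
      (0, none)).2

-- ===== PORT B =====
-- B's backward sweep: the loop counter k+1 means current text index k;
-- prev is the DP row for index k+1 (length p.length+1)
def pbLoop (t p : List Char) : Nat → List Nat → Nat × Option Int → Nat × Option Int
  | 0, _, best => best
  | k+1, prev, best =>
    let c := t.getD k ' '
    let cur := ((List.range p.length).map
        (fun j => if p.getD j ' ' = c then prev.getD (j + 1) 0 + 1 else 0)) ++ [0]
    let rowMax := cur.foldl max 0
    let best' := if rowMax > 0 ∧ rowMax ≥ best.1 then (rowMax, some (k : Int)) else best
    pbLoop t p k cur best'

def prefix_score_alt (text : String) (prefixString : String) : Option Int :=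
  let t := text.toList
  let p := prefixString.toList
  (pbLoop t p t.length (List.replicate (p.length + 1) 0) (0, none)).2

-- ===== PRECONDITION & SPEC =====
def Spec_prefix_score (text : String) (prefixString : String) (out : Option Int) : Prop := out = prefix_score_alt text prefixString
instance (text : String) (prefixString : String) (out : Option Int) : Decidable (Spec_prefix_score text prefixString out) := by unfold Spec_prefix_score; infer_instance

-- ===== CLAIM (what is proved, stated in full; the proofs are below) =====
def Claim_equal_prefix_score : Prop := ∀ (text : String) (prefixString : String), Dom_prefix_score text prefixString → Spec_prefix_score text prefixString (prefix_score text prefixString)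

-- ===== LEMMAS AND PROOFS =====

-- length of the longest common prefix of two lists
def lcp : List Char → List Char → Nat
  | a :: as, b :: bs => if a = b then lcp as bs + 1 else 0
  | _, _ => 0

-- max over j' ∈ [j, j+rem) of lcp (t.drop i) (p.drop j')
def maxFrom (t p : List Char) (i : Nat) : Nat → Nat → Nat
  | _, 0 => 0
  | j, rem+1 => max (lcp (t.drop i) (p.drop j)) (maxFrom t p i (j + 1) rem)

-- the forward earliest-strict-max accumulator over i < k that A computes
def bestSpec (t p : List Char) : Nat → Nat × Option Int
  | 0 => (0, none)
  | k+1 =>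
    let s := bestSpec t p k
    let v := maxFrom t p k 0 p.length
    if v > s.1 then (v, some (k : Int)) else s

theorem lcp_nil_right (l : List Char) : lcp l [] = 0 := by cases l <;> simp [lcp]

theorem lcp_zero_of_ge {p : List Char} {j : Nat} (l : List Char) (h : p.length ≤ j) :
    lcp l (p.drop j) = 0 := by
  rw [List.drop_eq_nil_of_le h]; exact lcp_nil_right l

theorem lcp_head_match {t p : List Char} {i j : Nat} (hi : i < t.length) (hj : j < p.length)
    (heq : p.getD j ' ' = t.getD i ' ') :
    lcp (t.drop i) (p.drop j) = 1 + lcp (t.drop (i + 1)) (p.drop (j + 1)) := by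
  rw [List.getD_eq_getElem _ _ hj, List.getD_eq_getElem _ _ hi] at heq
  rw [← List.getElem_cons_drop hi, ← List.getElem_cons_drop hj]
  simp only [lcp, if_pos heq.symm]
  omega

theorem lcp_head_mismatch {t p : List Char} {i j : Nat} (hi : i < t.length) (hj : j < p.length)
    (hne : p.getD j ' ' ≠ t.getD i ' ') :
    lcp (t.drop i) (p.drop j) = 0 := by
  rw [List.getD_eq_getElem _ _ hj, List.getD_eq_getElem _ _ hi] at hne
  rw [← List.getElem_cons_drop hi, ← List.getElem_cons_drop hj]
  simp only [lcp]
  rw [if_neg (fun h => hne h.symm)]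

theorem pzWhile_eq (t p : List Char) (i j : Nat) :
    ∀ fuel ic, p.length - (j + ic) ≤ fuel → j + ic ≤ p.length →
      pzWhile t p i j ic fuel = ic + lcp (t.drop (i + ic)) (p.drop (j + ic)) := by
  intro fuel
  induction fuel with
  | zero =>
    intro ic h1 h2
    have h : p.length ≤ j + ic := by omega
    simp [pzWhile, lcp_zero_of_ge _ h]
  | succ fuel ih =>
    intro ic h1 h2
    simp only [pzWhile]
    split
    · rename_i hc
      obtain ⟨hj, hi, heq⟩ := hc
      rw [ih (ic + 1) (by omega) (by omega)]
      rw [show i + (ic + 1) = (i + ic) + 1 by omega, show j + (ic + 1) = (j + ic) + 1 by omega]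
      rw [lcp_head_match hi hj heq]
      omega
    · rename_i hc
      by_cases hj : j + ic < p.length
      · by_cases hi : i + ic < t.length
        · have hne : p.getD (j + ic) ' ' ≠ t.getD (i + ic) ' ' := by tauto
          rw [lcp_head_mismatch hi hj hne]
          omega
        · rw [List.drop_eq_nil_of_le (as := t) (i := i + ic) (by omega), show lcp [] (p.drop (j+ic)) = 0 by
            cases p.drop (j+ic) <;> simp [lcp]]
          omega
      · rw [lcp_zero_of_ge _ (by omega)]
        omega

theorem pzInnerGo_eq (t p : List Char) (i : Nat) (hi : i < t.length) :
    ∀ rem j ic sc idx, j + rem = p.length → ic ≤ sc →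
      pzInnerGo t p i j rem ic sc idx =
        (if maxFrom t p i j rem > sc then (maxFrom t p i j rem, some (i : Int)) else (sc, idx)) := by
  intro rem
  induction rem with
  | zero => intro j ic sc idx _ _; simp [pzInnerGo, maxFrom]
  | succ rem ih =>
    intro j ic sc idx hlen hic
    have hj : j < p.length := by omega
    simp only [pzInnerGo, maxFrom]
    by_cases hm : p.getD j ' ' = t.getD i ' '
    · have hv : pzWhile t p i j 1 p.length = lcp (t.drop i) (p.drop j) := by
        rw [pzWhile_eq t p i j p.length 1 (by omega) (by omega), lcp_head_match hi hj hm]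
      simp only [if_pos hm, hv]
      set v := lcp (t.drop i) (p.drop j) with hvdef
      set M := maxFrom t p i (j + 1) rem with hM
      by_cases h1 : v > sc
      · simp only [if_pos h1]
        rw [ih (j + 1) v v (some (i : Int)) (by omega) (le_refl v)]
        by_cases h2 : M > v
        · rw [if_pos h2, if_pos (by omega : max v M > sc)]
          rw [show max v M = M by omega]
        · rw [if_neg h2, if_pos (by omega : max v M > sc)]
          rw [show max v M = v by omega]
      · simp only [if_neg h1]
        rw [ih (j + 1) v sc idx (by omega) (by omega)]
        by_cases h2 : M > sc
        · rw [if_pos h2, if_pos (by omega : max v M > sc)]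
          rw [show max v M = M by omega]
        · rw [if_neg h2, if_neg (by omega : ¬ max v M > sc)]
    · have hv : lcp (t.drop i) (p.drop j) = 0 := lcp_head_mismatch hi hj hm
      simp only [if_neg hm, if_neg (by omega : ¬ ic > sc)]
      rw [ih (j + 1) ic sc idx (by omega) hic, hv]
      simp

-- A's outer loop computes bestSpec
theorem foldA_eq (t p : List Char) :
    ∀ k, k ≤ t.length →
      (List.range k).foldl (fun (st : Nat × Option Int) i => pzInnerGo t p i 0 p.length 0 st.1 st.2)
        (0, none) = bestSpec t p k := by
  intro k
  induction k with
  | zero => intro _; simp [bestSpec]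
  | succ k ih =>
    intro hk
    rw [List.range_succ, List.foldl_append, ih (by omega)]
    simp only [List.foldl_cons, List.foldl_nil, bestSpec]
    rw [pzInnerGo_eq t p k (by omega) p.length 0 0 (bestSpec t p k).1 (bestSpec t p k).2
        (by omega) (Nat.zero_le _)]

-- the DP row for text index i
def rowList (t p : List Char) (i : Nat) : List Nat :=
  (List.range (p.length + 1)).map (fun j => lcp (t.drop i) (p.drop j))

theorem rowList_getD (t p : List Char) (i j : Nat) (hj : j < p.length + 1) :
    (rowList t p i).getD j 0 = lcp (t.drop i) (p.drop j) := by
  rw [rowList, List.getD_eq_getElem _ _ (by simpa using hj)]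
  simp

theorem foldl_max_init (g : Nat → Nat) :
    ∀ (l : List Nat) (a : Nat),
      l.foldl (fun b x => max b (g x)) a = max a (l.foldl (fun b x => max b (g x)) 0) := by
  intro l
  induction l with
  | nil => intro a; simp
  | cons x l ih =>
    intro a
    simp only [List.foldl_cons]
    rw [ih (max a (g x)), ih (max 0 (g x))]
    simp [Nat.max_assoc]

theorem foldl_maxFrom (t p : List Char) (i : Nat) :
    ∀ rem j, (List.range' j rem).foldl (fun b x => max b (lcp (t.drop i) (p.drop x))) 0 =
      maxFrom t p i j rem := by
  intro rem
  induction rem with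
  | zero => intro j; simp [maxFrom]
  | succ rem ih =>
    intro j
    rw [List.range'_succ, List.foldl_cons, foldl_max_init, ih (j + 1)]
    simp [maxFrom]

-- snoc form of maxFrom: the last index can be split off
theorem maxFrom_snoc (t p : List Char) (i : Nat) :
    ∀ rem j, maxFrom t p i j (rem + 1) =
      max (maxFrom t p i j rem) (lcp (t.drop i) (p.drop (j + rem))) := by
  intro rem
  induction rem with
  | zero => intro j; simp [maxFrom]
  | succ rem ih =>
    intro j
    rw [show rem + 1 + 1 = (rem + 1) + 1 by rfl]
    rw [maxFrom, ih (j + 1), maxFrom]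
    rw [show j + 1 + rem = j + (rem + 1) by omega, Nat.max_assoc]

theorem bestSpec_zero (t p : List Char) : ∀ k, (bestSpec t p k).1 = 0 → (bestSpec t p k).2 = none := by
  intro k
  induction k with
  | zero => simp [bestSpec]
  | succ k ih =>
    simp only [bestSpec]
    split
    · rename_i h; intro h0; omega
    · exact ih

-- the row built by pbLoop's step is the DP row for index k
theorem cur_eq_rowList (t p : List Char) (k : Nat) (hk : k < t.length) :
    ((List.range p.length).map
        (fun j => if p.getD j ' ' = t.getD k ' ' then (rowList t p (k + 1)).getD (j + 1) 0 + 1 else 0))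
      ++ [0] = rowList t p k := by
  have hmap : (List.range p.length).map
      (fun j => if p.getD j ' ' = t.getD k ' ' then (rowList t p (k + 1)).getD (j + 1) 0 + 1 else 0)
      = (List.range p.length).map (fun j => lcp (t.drop k) (p.drop j)) := by
    apply List.map_congr_left
    intro j hj
    rw [List.mem_range] at hj
    by_cases hm : p.getD j ' ' = t.getD k ' '
    · rw [if_pos hm, rowList_getD t p (k + 1) (j + 1) (by omega), lcp_head_match hk hj hm]
      omega
    · rw [if_neg hm, lcp_head_mismatch hk hj hm]
  rw [hmap, rowList, List.range_succ, List.map_append]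
  congr 1
  simp [List.drop_length, lcp_nil_right]

theorem foldl_max_rowList (t p : List Char) (k : Nat) :
    (rowList t p k).foldl max 0 = maxFrom t p k 0 p.length := by
  rw [rowList, List.foldl_map, List.range_eq_range', foldl_maxFrom t p k (p.length + 1) 0]
  rw [maxFrom_snoc t p k p.length 0]
  simp [List.drop_length, lcp_nil_right]

theorem pbLoop_eq (t p : List Char) :
    ∀ k, k ≤ t.length → ∀ b : Nat × Option Int,
      pbLoop t p k (rowList t p k) b =
        (if (bestSpec t p k).1 > 0 ∧ (bestSpec t p k).1 ≥ b.1 then bestSpec t p k else b) := by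
  intro k
  induction k with
  | zero =>
    intro _ b
    simp [pbLoop, bestSpec]
  | succ k ih =>
    intro hk b
    simp only [pbLoop]
    rw [cur_eq_rowList t p k (by omega), foldl_max_rowList t p k]
    rw [ih (by omega)]
    simp only [bestSpec]
    set s := bestSpec t p k with hs
    set v := maxFrom t p k 0 p.length with hvd
    by_cases h1 : v > 0 ∧ v ≥ b.1
    · rw [if_pos h1]
      by_cases h2 : v > s.1
      · rw [if_pos h2]
        rw [if_neg (by simp; omega), if_pos (by simp; omega)]
      · rw [if_neg h2]
        rw [if_pos ⟨by omega, by omega⟩, if_pos ⟨by omega, by omega⟩]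
    · rw [if_neg h1]
      by_cases h2 : v > s.1
      · rw [if_pos h2]
        have hv0 : 0 < v := by omega
        rw [if_neg (by simp; omega), if_neg (by simp; omega)]
      · rw [if_neg h2]

theorem rowList_len (t p : List Char) : rowList t p t.length = List.replicate (p.length + 1) 0 := by
  rw [rowList, List.eq_replicate_iff]
  constructor
  · simp
  · intro b hb
    simp only [List.mem_map] at hb
    obtain ⟨j, _, hj⟩ := hb
    rw [List.drop_length] at hj
    cases hx : List.drop j p <;> simp [lcp] at hj <;> omega

-- ===== VERDICT (by name: the statement is the Claim_ definition above) =====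
theorem prefix_score_spec : Claim_equal_prefix_score := by
  intro text prefixString _
  simp only [Spec_prefix_score, prefix_score, prefix_score_alt]
  set t := text.toList with ht
  set p := prefixString.toList with hp
  rw [foldA_eq t p t.length (le_refl _), ← rowList_len t p, pbLoop_eq t p t.length (le_refl _)]
  by_cases h : (bestSpec t p t.length).1 > 0
  · simp [h]
  · have h0 : (bestSpec t p t.length).1 = 0 := by omega
    rw [bestSpec_zero t p t.length h0]
    simp [h]
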